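-- pv_equiv track=rewrite | github.com/Aarav500/Notetaking_APP | ai_note_system/processing/ml_enhancements/quiz_adaptive_trainer.py | distribute_question_types
-- ===== SOURCE A (Python) =====
-- from typing import Dict, Any, List, Optional, Union, Tuple
--
-- def distribute_question_types(
--     question_count: int,
--     question_types: List[str]
-- ) -> Dict[str, int]:
--     """
--     Distribute questions among question types.
--
--     Args:
--         question_count (int): Total number of questions
--         question_types (List[str]): Types of questions to include
--
--     Returns:
--         Dict[str, int]: Number of questions for each type
--     """
--     # Initialize counts
--     type_counts = {q_type: 0 for q_type in question_types}
--
--     # Distribute questions evenly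
--     for i in range(question_count):
--         q_type = question_types[i % len(question_types)]
--         type_counts[q_type] += 1
--
--     return type_counts
-- ===== SOURCE B (Python) =====
-- def distribute_question_types(
--     question_count: int,
--     question_types: list
-- ) -> dict:
--     # Closed-form distribution: each index j of question_types receives
--     # base + 1 extra for the first (question_count % n) indices, accumulated per type.
--     counts = {t: 0 for t in question_types}
--     if question_count > 0 and question_types:
--         base, rem = divmod(question_count, len(question_types))
--         for i, t in enumerate(question_types):
--             counts[t] += base + (1 if i < rem else 0)
--     return counts
-- ===== Notes on version B (the rewrite author's own statement) =====
-- stated objective: alternative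
-- what changed: A loops question_count times indexing round-robin into question_types; B computes base, rem = divmod(question_count, n) once and gives each type index base plus one extra for the first rem indices in a single pass over the types.
import Mathlib
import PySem

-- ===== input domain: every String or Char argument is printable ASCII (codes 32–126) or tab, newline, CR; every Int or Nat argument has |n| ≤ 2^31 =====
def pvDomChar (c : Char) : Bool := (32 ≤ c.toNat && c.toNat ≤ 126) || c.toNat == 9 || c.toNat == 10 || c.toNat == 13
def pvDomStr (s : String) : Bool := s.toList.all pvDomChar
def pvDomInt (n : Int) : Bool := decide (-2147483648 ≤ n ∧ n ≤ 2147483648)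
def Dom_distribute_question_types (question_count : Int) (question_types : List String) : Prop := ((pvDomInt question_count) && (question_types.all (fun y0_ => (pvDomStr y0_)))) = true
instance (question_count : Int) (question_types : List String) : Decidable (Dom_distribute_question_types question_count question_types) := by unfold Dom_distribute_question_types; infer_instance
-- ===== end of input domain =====

-- B replaces A's per-question round-robin loop by the closed form
-- base = count // n with one extra for the first count % n indices, accumulated per type
-- in one pass over the types (objective: alternative).


-- ===== PORT A =====
def distribute_question_types (question_count : Int) (question_types : List String) : List (String × Int) :=
  -- type_counts = {q_type: 0 for q_type in question_types}
  let type_counts : PySem.Dict String Int :=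
    question_types.foldl (fun d q_type => d.insert q_type 0) PySem.Dict.empty
  -- for i in range(question_count): type_counts[question_types[i % len(question_types)]] += 1
  -- inside Pre_ the index i % n is in range and the key is present, so pyGetD's default
  -- and modify's default 0 are never used (exact there; i % 0 raises, excluded by Pre_)
  let final : PySem.Dict String Int :=
    (PySem.List.pyRange 0 question_count 1).foldl
      (fun d i =>
        d.modify (PySem.List.pyGetD question_types
            (PySem.Int.mod i (question_types.length : Int)) "") 0 (fun v => v + 1))
      type_counts
  final.items

-- ===== PORT B =====
def distribute_question_types_alt (question_count : Int) (question_types : List String) : List (String × Int) :=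
  let counts0 : PySem.Dict String Int :=
    question_types.foldl (fun d t => d.insert t 0) PySem.Dict.empty
  let counts : PySem.Dict String Int :=
    if 0 < question_count ∧ question_types ≠ [] then
      let base := PySem.Int.floordiv question_count (question_types.length : Int)
      let rem := PySem.Int.mod question_count (question_types.length : Int)
      (PySem.List.enumerate question_types 0).foldl
        (fun d p => d.modify p.2 0 (fun v => v + (base + if p.1 < rem then 1 else 0)))
        counts0
    else counts0
  counts.items

-- ===== PRECONDITION & SPEC =====
-- Pre_ excludes only question_types = [] with question_count > 0, where A raises ZeroDivisionError (i % 0).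
def Pre_distribute_question_types (question_count : Int) (question_types : List String) : Prop :=
  0 < question_count → question_types ≠ []
instance (question_count : Int) (question_types : List String) : Decidable (Pre_distribute_question_types question_count question_types) := by unfold Pre_distribute_question_types; infer_instance
def pvWitness_distribute_question_types : Int × List String := (7, ["mc", "tf", "short"])

def Spec_distribute_question_types (question_count : Int) (question_types : List String) (out : List (String × Int)) : Prop := out = distribute_question_types_alt question_count question_types
instance (question_count : Int) (question_types : List String) (out : List (String × Int)) : Decidable (Spec_distribute_question_types question_count question_types out) := by unfold Spec_distribute_question_types; infer_instance

-- ===== CLAIM (what is proved, stated in full; the proofs are below) =====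
def Claim_equal_distribute_question_types : Prop := ∀ (question_count : Int) (question_types : List String), Dom_distribute_question_types question_count question_types → Pre_distribute_question_types question_count question_types → Spec_distribute_question_types question_count question_types (distribute_question_types question_count question_types)


-- ===== LEMMAS AND PROOFS =====

-- Set.update does nothing when every updated element is already present
lemma set_update_of_mem (l : List String) : ∀ (s : PySem.Set String), (∀ x ∈ l, x ∈ s) →
    PySem.Set.update s l = s := by
  induction l with
  | nil => intro s _; rfl
  | cons x xs ih =>
      intro s h
      have hx : x ∈ s := h x (by simp)
      have hadd : PySem.Set.add s x = s := by
        simp [PySem.Set.add, PySem.Set.contains, hx]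
      show PySem.Set.update (PySem.Set.add s x) xs = s
      rw [hadd]
      exact ih s (fun y hy => h y (by simp [hy]))

-- value of a modify-accumulate loop at one key: initial value plus the sum of the
-- increments of the loop elements whose key matches
lemma getD_foldl_modify_add {α : Type} (key : α → String) (c : α → Int) (l : List α) :
    ∀ (d : PySem.Dict String Int) (k : String),
      (l.foldl (fun d x => d.modify (key x) 0 (fun v => v + c x)) d).getD k 0
        = d.getD k 0 + ((l.filter (fun x => key x == k)).map c).sum := by
  induction l with
  | nil => intro d k; simp
  | cons x xs ih =>
      intro d k
      rw [List.foldl_cons, ih]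
      by_cases hk : key x = k
      · simp [hk, add_comm, add_assoc, add_left_comm]
      · have hk' : ¬ ((key x == k) = true) := by simp [hk]
        simp [hk', PySem.Dict.getD_modify, Ne.symm hk]

-- for a Nodup list, the sum of the indicator of one value is 1 or 0 by membership
lemma sum_indicator_nodup (l : List Nat) (hnd : l.Nodup) (r : Nat) :
    (l.map (fun j => if j = r then (1 : Int) else 0)).sum = if r ∈ l then 1 else 0 := by
  induction l with
  | nil => simp
  | cons x xs ih =>
      have hx : x ∉ xs := (List.nodup_cons.mp hnd).1
      have ih' := ih (List.nodup_cons.mp hnd).2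
      by_cases hxr : x = r
      · subst hxr
        simp [ih', hx]
      · simp [hxr, ih', Ne.symm hxr]

-- core counting identity: among 0..m-1, residue j (mod nn) occurs m/nn + (1 if j < m%nn) times
lemma count_residue (nn : Nat) (hn : 0 < nn) (p : Nat → Bool) : ∀ (m : Nat),
    (((List.range m).countP (fun i => p (i % nn)) : Nat) : Int)
      = (((List.range nn).filter p).map
          (fun j => ((m / nn : Nat) : Int) + if j < m % nn then 1 else 0)).sum := by
  intro m
  induction m with
  | zero => simp
  | succ m ih =>
      have hr : m % nn < nn := Nat.mod_lt _ hn
      have hdm : nn * (m / nn) + m % nn = m := Nat.div_add_mod m nn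
      have hsucc : ((m + 1) / nn = m / nn + 1 ∧ (m + 1) % nn = 0 ∧ m % nn + 1 = nn)
          ∨ ((m + 1) / nn = m / nn ∧ (m + 1) % nn = m % nn + 1) := by
        have hexp : nn * (m / nn + 1) = nn * (m / nn) + nn := by ring
        by_cases hcase : m % nn + 1 = nn
        · left
          have hm1 : m + 1 = nn * (m / nn + 1) := by omega
          refine ⟨?_, ?_, hcase⟩
          · rw [hm1, Nat.mul_div_cancel_left _ hn]
          · rw [hm1, Nat.mul_mod_right]
        · right
          have hm1 : m + 1 = nn * (m / nn) + (m % nn + 1) := by omega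
          have hlt : m % nn + 1 < nn := by omega
          constructor
          · rw [hm1, Nat.mul_add_div hn, Nat.div_eq_of_lt hlt, Nat.add_zero]
          · rw [hm1, Nat.mul_add_mod, Nat.mod_eq_of_lt hlt]
      -- left side gains the indicator of p (m % nn)
      have hleft : (((List.range (m + 1)).countP (fun i => p (i % nn)) : Nat) : Int)
          = (((List.range m).countP (fun i => p (i % nn)) : Nat) : Int)
            + (if p (m % nn) then 1 else 0) := by
        rw [List.range_succ, List.countP_append]
        simp only [List.countP_cons, List.countP_nil]
        split <;> push_cast <;> omega
      -- right side: pointwise, each j gains the indicator of j = m % nn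
      have hpoint : ∀ j ∈ (List.range nn).filter p,
          (((m + 1) / nn : Nat) : Int) + (if j < (m + 1) % nn then 1 else 0)
            = ((((m / nn : Nat) : Int) + if j < m % nn then 1 else 0)
                + if j = m % nn then 1 else 0) := by
        intro j hj
        have hjn : j < nn := List.mem_range.mp (List.mem_filter.mp hj).1
        rcases hsucc with ⟨h1, h2, h3⟩ | ⟨h1, h2⟩ <;> rw [h1, h2] <;> push_cast <;>
          split_ifs <;> omega
      have hright : (((List.range nn).filter p).map
            (fun j => (((m + 1) / nn : Nat) : Int) + if j < (m + 1) % nn then 1 else 0)).sum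
          = (((List.range nn).filter p).map
              (fun j => ((m / nn : Nat) : Int) + if j < m % nn then 1 else 0)).sum
            + (if p (m % nn) then 1 else 0) := by
        rw [List.map_congr_left hpoint, PySem.List.sum_map_add_int]
        congr 1
        rw [sum_indicator_nodup _ ((List.nodup_range.filter p)) (m % nn)]
        by_cases hp : p (m % nn)
        · simp [List.mem_filter, List.mem_range, hr, hp]
        · simp [List.mem_filter, hp]
      rw [hleft, hright, ih]

-- ===== VERDICT (by name: the statement is the Claim_ definition above) =====
-- main equivalence, positive case factored out
lemma main_pos (qc : Int) (qts : List String) (hqc : 0 < qc) (hne : qts ≠ []) :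
    distribute_question_types qc qts = distribute_question_types_alt qc qts := by
  have hn : 0 < qts.length := List.length_pos_iff.mpr hne
  set nn := qts.length with hnn
  set m := qc.toNat with hm
  have hmq : (m : Int) = qc := Int.toNat_of_nonneg (le_of_lt hqc)
  set init : PySem.Dict String Int :=
    qts.foldl (fun d t => d.insert t 0) PySem.Dict.empty with hinit
  have hinit_keys : init.keys = PySem.Set.ofList qts := by
    rw [hinit, PySem.Dict.keys_foldl_insert qts (fun _ _ => 0) PySem.Dict.empty,
      PySem.Dict.keys_empty, PySem.Set.ofList_eq_foldl]
    rfl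
  have hinit_nodup : init.keys.Nodup :=
    PySem.Dict.nodup_keys_foldl_insert qts (fun _ _ => 0) _ (by
      rw [PySem.Dict.keys_empty]; exact List.nodup_nil)
  -- the two loops, rebased on List.range
  have hA : (PySem.List.pyRange 0 qc 1).foldl
      (fun d i => d.modify (PySem.List.pyGetD qts (PySem.Int.mod i (nn : Int)) "") 0
        (fun v => v + 1)) init
      = (List.range m).foldl
          (fun d j => d.modify (qts.getD (j % nn) "") 0 (fun v => v + 1)) init := by
    rw [PySem.List.pyRange_one, List.foldl_map, sub_zero]
    congr 1
    funext d j
    simp only [zero_add, PySem.Int.mod_natCast, PySem.List.pyGetD_natCast]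
  have hB : (PySem.List.enumerate qts 0).foldl
      (fun d p => d.modify p.2 0
        (fun v => v + (PySem.Int.floordiv qc (nn : Int)
          + if p.1 < PySem.Int.mod qc (nn : Int) then 1 else 0))) init
      = (List.range nn).foldl
          (fun d j => d.modify (qts.getD j "") 0
            (fun v => v + (((m / nn : Nat) : Int) + if j < m % nn then 1 else 0))) init := by
    rw [PySem.List.enumerate_eq_map_pyRange qts "", List.foldl_map,
      PySem.List.pyRange_one, List.foldl_map, sub_zero, PySem.List.len_eq, ← hmq]
    congr 1
    funext d j
    simp only [zero_add, PySem.List.pyGetD_natCast, PySem.Int.floordiv_natCast,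
      PySem.Int.mod_natCast, Nat.cast_lt]
  dsimp only [distribute_question_types, distribute_question_types_alt]
  rw [if_pos ⟨hqc, hne⟩, hA, hB]
  -- both final dicts keep init's (Nodup) keys; compare items pointwise via getD
  have hkeysA : ((List.range m).foldl
      (fun d j => d.modify (qts.getD (j % nn) "") 0 (fun v => v + 1)) init).keys
      = init.keys := by
    rw [PySem.Dict.keys_foldl_modify_key (List.range m)
      (fun j => qts.getD (j % nn) "") 0 (fun _ _ => fun v => v + 1) init]
    apply set_update_of_mem
    intro x hx
    rw [hinit_keys, PySem.Set.mem_ofList]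
    obtain ⟨j, _, rfl⟩ := List.mem_map.mp hx
    rw [List.getD_eq_getElem _ _ (Nat.mod_lt _ hn)]
    exact List.getElem_mem _
  have hkeysB : ((List.range nn).foldl
      (fun d j => d.modify (qts.getD j "") 0
        (fun v => v + (((m / nn : Nat) : Int) + if j < m % nn then 1 else 0))) init).keys
      = init.keys := by
    rw [PySem.Dict.keys_foldl_modify_key (List.range nn)
      (fun j => qts.getD j "") 0
      (fun _ j => fun v => v + (((m / nn : Nat) : Int) + if j < m % nn then 1 else 0)) init]
    apply set_update_of_mem
    intro x hx
    rw [hinit_keys, PySem.Set.mem_ofList]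
    obtain ⟨j, hj, rfl⟩ := List.mem_map.mp hx
    rw [List.getD_eq_getElem _ _ (List.mem_range.mp hj)]
    exact List.getElem_mem _
  have hndA : ((List.range m).foldl
      (fun d j => d.modify (qts.getD (j % nn) "") 0 (fun v => v + 1)) init).keys.Nodup :=
    PySem.Dict.nodup_keys_foldl_modify_key _ _ _ _ _ hinit_nodup
  have hndB : ((List.range nn).foldl
      (fun d j => d.modify (qts.getD j "") 0
        (fun v => v + (((m / nn : Nat) : Int) + if j < m % nn then 1 else 0))) init).keys.Nodup :=
    PySem.Dict.nodup_keys_foldl_modify_key _ _ _ _ _ hinit_nodup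
  rw [PySem.Dict.items_eq_map_keys _ hndA 0, PySem.Dict.items_eq_map_keys _ hndB 0,
    hkeysA, hkeysB]
  apply List.map_congr_left
  intro k _
  have e1 := getD_foldl_modify_add (fun j => qts.getD (j % nn) "") (fun _ => (1 : Int))
    (List.range m) init k
  have e2 := getD_foldl_modify_add (fun j => qts.getD j "")
    (fun j => ((m / nn : Nat) : Int) + if j < m % nn then 1 else 0) (List.range nn) init k
  have hcr := count_residue nn hn (fun j => qts.getD j "" == k) m
  rw [e1, e2, PySem.List.sum_map_const_int, mul_one, ← List.countP_eq_length_filter, hcr]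

theorem distribute_question_types_spec : Claim_equal_distribute_question_types := by
  intro qc qts _ hpre
  unfold Spec_distribute_question_types
  by_cases hqc : 0 < qc
  · exact main_pos qc qts hqc (hpre hqc)
  · dsimp only [distribute_question_types, distribute_question_types_alt]
    have h1 : PySem.List.pyRange 0 qc 1 = [] :=
      PySem.List.pyRange_one_eq_nil (by omega)
    have h2 : ¬ (0 < qc ∧ qts ≠ []) := fun h => hqc h.1
    rw [h1, if_neg h2]
    rfl
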